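-- pv_equiv track=rewrite | github.com/robertmeisner/mcp_sqlite_memory_bank | src/mcp_sqlite_memory_bank/tools/discovery.py | _generate_relationship_recommendations
-- ===== SOURCE A (Python) =====
-- from typing import Any, Dict, List, Optional, cast
--
-- def _generate_relationship_recommendations(
--     relationships: Dict[str, Any], insights: List[str]
-- ) -> List[str]:
--     """Generate actionable recommendations based on discovered relationships."""
--     recommendations = []
--
--     # Find tables with many connections
--     highly_connected = []
--     for table, rels in relationships.items():
--         total_connections = (
--             len(rels.get("foreign_key_refs", []))
--             + len(rels.get("semantic_similar", []))
--             + len(rels.get("temporal_related", []))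
--             + len(rels.get("naming_related", []))
--         )
--         if total_connections >= 3:
--             highly_connected.append(table)
--
--     if highly_connected:
--         recommendations.append(
--             f"Focus queries on highly connected tables: {', '.join(highly_connected[:3])}"
--         )
--
--     # Find tables with semantic relationships
--     semantic_tables = []
--     for table, rels in relationships.items():
--         if rels.get("semantic_similar"):
--             semantic_tables.append(table)
--
--     if semantic_tables:
--         recommendations.append(
--             f"Use semantic search across related tables: {', '.join(semantic_tables[:3])}"
--         )
--
--     # Find tables with temporal relationships
--     temporal_tables = []
--     for table, rels in relationships.items():
--         if rels.get("temporal_related"):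
--             temporal_tables.append(table)
--
--     if temporal_tables:
--         recommendations.append(
--             f"Consider temporal analysis for time-related tables: {', '.join(temporal_tables[:3])}"
--         )
--
--     if not recommendations:
--         recommendations.append(
--             "Consider adding more structured relationships or content to improve discoverability"
--         )
--
--     return recommendations
-- ===== SOURCE B (Python) =====
-- from typing import Any, Dict, List
--
--
-- def _generate_relationship_recommendations(
--     relationships: Dict[str, Any], insights: List[str]
-- ) -> List[str]:
--     """Single pass over relationships.items(), then emit the recommendation strings."""
--     highly_connected: List[str] = []
--     semantic_tables: List[str] = []
--     temporal_tables: List[str] = []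
--     for table, rels in relationships.items():
--         fk = rels.get("foreign_key_refs", [])
--         sem = rels.get("semantic_similar", [])
--         temp = rels.get("temporal_related", [])
--         naming = rels.get("naming_related", [])
--         if len(fk) + len(sem) + len(temp) + len(naming) >= 3:
--             highly_connected.append(table)
--         if rels.get("semantic_similar"):
--             semantic_tables.append(table)
--         if rels.get("temporal_related"):
--             temporal_tables.append(table)
--
--     pieces = [
--         (highly_connected, "Focus queries on highly connected tables: "),
--         (semantic_tables, "Use semantic search across related tables: "),
--         (temporal_tables, "Consider temporal analysis for time-related tables: "),
--     ]
--     recommendations = [prefix + ", ".join(tables[:3]) for tables, prefix in pieces if tables]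
--     return recommendations or [
--         "Consider adding more structured relationships or content to improve discoverability"
--     ]
-- ===== Notes on version B (the rewrite author's own statement) =====
-- stated objective: alternative
-- what changed: A makes three separate passes over relationships.items(); B makes one fused pass accumulating the three table lists, then emits the recommendation strings from a (list, prefix) piece table via a comprehension with the or-fallback.
import Mathlib
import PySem

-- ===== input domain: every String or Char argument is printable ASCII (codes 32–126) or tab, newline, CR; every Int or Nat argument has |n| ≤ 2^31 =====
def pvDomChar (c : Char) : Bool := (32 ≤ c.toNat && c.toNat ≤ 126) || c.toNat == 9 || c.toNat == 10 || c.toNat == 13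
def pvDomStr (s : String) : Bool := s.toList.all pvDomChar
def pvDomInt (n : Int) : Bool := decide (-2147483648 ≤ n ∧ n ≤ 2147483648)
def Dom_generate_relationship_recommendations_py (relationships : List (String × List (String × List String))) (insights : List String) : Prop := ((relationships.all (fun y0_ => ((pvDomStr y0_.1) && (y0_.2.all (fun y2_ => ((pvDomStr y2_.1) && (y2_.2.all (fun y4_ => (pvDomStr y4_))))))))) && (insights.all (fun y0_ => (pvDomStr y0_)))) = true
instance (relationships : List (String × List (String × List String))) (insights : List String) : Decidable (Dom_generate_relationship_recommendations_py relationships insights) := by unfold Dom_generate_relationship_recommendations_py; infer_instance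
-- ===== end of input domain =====

-- B fuses A's three scans over relationships.items() into one pass and emits the three
-- recommendation strings from a table of (list, prefix) pieces (objective: alternative decomposition).

-- ===== PORT A =====
-- rels.get(k, []) on the inner per-table dict
def pvGetL (rels : List (String × List String)) (k : String) : List String :=
  PySem.Dict.getD (PySem.Dict.mk rels) k []

def generate_relationship_recommendations_py (relationships : List (String × List (String × List String))) (insights : List String) : List String :=
  let recommendations : List String := []
  let highly_connected : List String := relationships.foldl (fun acc p =>
    let total_connections : Nat :=
      (pvGetL p.2 "foreign_key_refs").length
      + (pvGetL p.2 "semantic_similar").length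
      + (pvGetL p.2 "temporal_related").length
      + (pvGetL p.2 "naming_related").length
    if 3 ≤ total_connections then acc ++ [p.1] else acc) []
  let recommendations := if highly_connected ≠ [] then
      recommendations ++ ["Focus queries on highly connected tables: " ++ PySem.Str.join ", " (PySem.List.slice highly_connected none (some 3))]
    else recommendations
  let semantic_tables : List String := relationships.foldl (fun acc p =>
    if pvGetL p.2 "semantic_similar" ≠ [] then acc ++ [p.1] else acc) []
  let recommendations := if semantic_tables ≠ [] then
      recommendations ++ ["Use semantic search across related tables: " ++ PySem.Str.join ", " (PySem.List.slice semantic_tables none (some 3))]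
    else recommendations
  let temporal_tables : List String := relationships.foldl (fun acc p =>
    if pvGetL p.2 "temporal_related" ≠ [] then acc ++ [p.1] else acc) []
  let recommendations := if temporal_tables ≠ [] then
      recommendations ++ ["Consider temporal analysis for time-related tables: " ++ PySem.Str.join ", " (PySem.List.slice temporal_tables none (some 3))]
    else recommendations
  let recommendations := if recommendations = [] then
      recommendations ++ ["Consider adding more structured relationships or content to improve discoverability"]
    else recommendations
  recommendations

-- ===== PORT B =====
def generate_relationship_recommendations_py_alt (relationships : List (String × List (String × List String))) (insights : List String) : List String :=
  let acc := relationships.foldl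
    (fun (acc : List String × List String × List String) p =>
      let fk := pvGetL p.2 "foreign_key_refs"
      let sem := pvGetL p.2 "semantic_similar"
      let temp := pvGetL p.2 "temporal_related"
      let naming := pvGetL p.2 "naming_related"
      let hc := if 3 ≤ fk.length + sem.length + temp.length + naming.length then acc.1 ++ [p.1] else acc.1
      let st := if pvGetL p.2 "semantic_similar" ≠ [] then acc.2.1 ++ [p.1] else acc.2.1
      let tt := if pvGetL p.2 "temporal_related" ≠ [] then acc.2.2 ++ [p.1] else acc.2.2
      (hc, st, tt))
    ([], [], [])
  let pieces : List (List String × String) :=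
    [(acc.1, "Focus queries on highly connected tables: "),
     (acc.2.1, "Use semantic search across related tables: "),
     (acc.2.2, "Consider temporal analysis for time-related tables: ")]
  let recommendations := pieces.filterMap (fun q =>
    if q.1 ≠ [] then some (q.2 ++ PySem.Str.join ", " (PySem.List.slice q.1 none (some 3))) else none)
  if recommendations = [] then
    ["Consider adding more structured relationships or content to improve discoverability"]
  else recommendations

-- ===== PRECONDITION & SPEC =====
def Spec_generate_relationship_recommendations_py (relationships : List (String × List (String × List String))) (insights : List String) (out : List String) : Prop := out = generate_relationship_recommendations_py_alt relationships insights
instance (relationships : List (String × List (String × List String))) (insights : List String) (out : List String) : Decidable (Spec_generate_relationship_recommendations_py relationships insights out) := by unfold Spec_generate_relationship_recommendations_py; infer_instance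

-- ===== CLAIM (what is proved, stated in full; the proofs are below) =====
def Claim_equal_generate_relationship_recommendations_py : Prop := ∀ (relationships : List (String × List (String × List String))) (insights : List String), Dom_generate_relationship_recommendations_py relationships insights → Spec_generate_relationship_recommendations_py relationships insights (generate_relationship_recommendations_py relationships insights)

-- ===== LEMMAS AND PROOFS =====

-- B's fused fold computes componentwise exactly A's three separate folds.
theorem pv_fused (relationships : List (String × List (String × List String)))
    (a b c : List String) :
    relationships.foldl
      (fun (acc : List String × List String × List String) p =>
        let fk := pvGetL p.2 "foreign_key_refs"
        let sem := pvGetL p.2 "semantic_similar"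
        let temp := pvGetL p.2 "temporal_related"
        let naming := pvGetL p.2 "naming_related"
        let hc := if 3 ≤ fk.length + sem.length + temp.length + naming.length then acc.1 ++ [p.1] else acc.1
        let st := if pvGetL p.2 "semantic_similar" ≠ [] then acc.2.1 ++ [p.1] else acc.2.1
        let tt := if pvGetL p.2 "temporal_related" ≠ [] then acc.2.2 ++ [p.1] else acc.2.2
        (hc, st, tt))
      (a, b, c)
    = (relationships.foldl (fun acc p =>
        let total_connections : Nat :=
          (pvGetL p.2 "foreign_key_refs").length
          + (pvGetL p.2 "semantic_similar").length
          + (pvGetL p.2 "temporal_related").length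
          + (pvGetL p.2 "naming_related").length
        if 3 ≤ total_connections then acc ++ [p.1] else acc) a,
       relationships.foldl (fun acc p =>
        if pvGetL p.2 "semantic_similar" ≠ [] then acc ++ [p.1] else acc) b,
       relationships.foldl (fun acc p =>
        if pvGetL p.2 "temporal_related" ≠ [] then acc ++ [p.1] else acc) c) := by
  induction relationships generalizing a b c with
  | nil => rfl
  | cons hd tl ih => simp only [List.foldl_cons]; exact ih _ _ _

-- ===== VERDICT (by name: the statement is the Claim_ definition above) =====
theorem generate_relationship_recommendations_py_spec : Claim_equal_generate_relationship_recommendations_py := by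
  intro relationships insights _
  unfold Spec_generate_relationship_recommendations_py
  unfold generate_relationship_recommendations_py generate_relationship_recommendations_py_alt
  simp only [pv_fused, List.filterMap]
  split_ifs <;> simp_all
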